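-- pv_equiv track=rewrite | github.com/Datamine/low-bandwidth | src/collector.py | _latest_nethogs_block
-- ===== SOURCE A (Python) =====
-- _NETHOGS_REFRESH = "Refreshing:"
--
-- def _latest_nethogs_block(output: str) -> list[str]:
--     latest_block: list[str] = []
--     current_block: list[str] = []
--     saw_refresh = False
--     for raw_line in output.splitlines():
--         line = raw_line.strip()
--         if line == _NETHOGS_REFRESH:
--             if current_block:
--                 latest_block = current_block
--             current_block = []
--             saw_refresh = True
--             continue
--         if saw_refresh:
--             current_block.append(raw_line)
--     if current_block:
--         return current_block
--     if latest_block: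
--         return latest_block
--     return output.splitlines()
-- ===== SOURCE B (Python) =====
-- _NETHOGS_REFRESH = "Refreshing:"
--
-- def _latest_nethogs_block(output: str) -> list[str]:
--     lines = output.splitlines()
--     blocks = []
--     for raw in lines:
--         if raw.strip() == _NETHOGS_REFRESH:
--             blocks.append([])
--         elif blocks:
--             blocks[-1].append(raw)
--     nonempty = [b for b in blocks if b]
--     return nonempty[-1] if nonempty else lines
-- ===== Notes on version B (the rewrite author's own statement) =====
-- stated objective: simpler
-- what changed: B collects the lines into an explicit list of blocks in one pass and then selects the last non-empty block by filtering, replacing A's latest_block/current_block/saw_refresh state machine and its three-way return.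
import Mathlib
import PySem

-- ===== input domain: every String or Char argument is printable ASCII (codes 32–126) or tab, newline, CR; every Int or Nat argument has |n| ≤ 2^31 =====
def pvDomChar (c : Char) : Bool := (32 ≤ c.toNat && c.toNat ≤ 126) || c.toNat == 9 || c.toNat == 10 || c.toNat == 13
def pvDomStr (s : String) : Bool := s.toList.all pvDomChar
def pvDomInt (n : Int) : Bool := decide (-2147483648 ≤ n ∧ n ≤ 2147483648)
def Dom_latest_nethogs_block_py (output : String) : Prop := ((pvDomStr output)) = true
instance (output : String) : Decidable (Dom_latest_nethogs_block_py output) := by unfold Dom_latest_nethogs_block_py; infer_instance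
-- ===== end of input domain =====

-- B collects the lines into a list of blocks in one pass, then picks the last
-- non-empty block by filtering, instead of A's latest/current/saw state machine
-- (objective: simpler).

-- ===== PORT A =====
-- A's loop state: (latest_block, current_block, saw_refresh)
def pvLoopA : List String → List String → List String → Bool → (List String × List String × Bool)
  | [], lat, cur, saw => (lat, cur, saw)
  | raw :: rest, lat, cur, saw =>
    if PySem.Str.strip raw = "Refreshing:" then
      pvLoopA rest (if !cur.isEmpty then cur else lat) [] true
    else
      pvLoopA rest lat (if saw then cur ++ [raw] else cur) saw

def latest_nethogs_block_py (output : String) : List String :=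
  let st := pvLoopA (PySem.Str.splitlines output) [] [] false
  if !st.2.1.isEmpty then st.2.1
  else if !st.1.isEmpty then st.1
  else PySem.Str.splitlines output

-- ===== PORT B =====
-- B's loop: append a fresh empty block on a marker line, otherwise append the
-- line to the last block (if any block exists yet).
def pvLoopB : List String → List (List String) → List (List String)
  | [], blocks => blocks
  | raw :: rest, blocks =>
    if PySem.Str.strip raw = "Refreshing:" then
      pvLoopB rest (blocks ++ [[]])
    else if !blocks.isEmpty then
      pvLoopB rest (blocks.dropLast ++ [blocks.getLastD [] ++ [raw]])
    else
      pvLoopB rest blocks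

def latest_nethogs_block_py_alt (output : String) : List String :=
  let lines := PySem.Str.splitlines output
  let blocks := pvLoopB lines []
  let nonempty := blocks.filter (fun b => !b.isEmpty)
  match nonempty.getLast? with
  | some b => b
  | none => lines

-- ===== PRECONDITION & SPEC =====
def Spec_latest_nethogs_block_py (output : String) (out : List String) : Prop := out = latest_nethogs_block_py_alt output
instance (output : String) (out : List String) : Decidable (Spec_latest_nethogs_block_py output out) := by unfold Spec_latest_nethogs_block_py; infer_instance

-- ===== CLAIM (what is proved, stated in full; the proofs are below) =====
def Claim_equal_latest_nethogs_block_py : Prop := ∀ (output : String), Dom_latest_nethogs_block_py output → Spec_latest_nethogs_block_py output (latest_nethogs_block_py output)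

-- ===== LEMMAS AND PROOFS =====

-- answer extraction for A's final state / B's blocks, fallback lines0
def pvAnsA (lat cur : List String) (lines0 : List String) : List String :=
  if !cur.isEmpty then cur else if !lat.isEmpty then lat else lines0

def pvAnsB (blocks : List (List String)) (lines0 : List String) : List String :=
  match (blocks.filter (fun b => !b.isEmpty)).getLast? with
  | some b => b
  | none => lines0

lemma pvFilter_append_single (bs : List (List String)) (cur : List String) :
    (bs ++ [cur]).filter (fun b => !b.isEmpty)
      = bs.filter (fun b => !b.isEmpty) ++ (if !cur.isEmpty then [cur] else []) := by
  simp [List.filter_append]; split <;> simp_all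

lemma pvGetLast?_filter_ne (bs : List (List String)) (b : List String)
    (h : (bs.filter (fun b => !b.isEmpty)).getLast? = some b) : b ≠ [] := by
  have hm : b ∈ bs.filter (fun b => !b.isEmpty) := List.mem_of_getLast? h
  have := (List.mem_filter.mp hm).2
  simpa using this

lemma pvAnsB_concat (bs : List (List String)) (cur lines0 : List String) :
    pvAnsB (bs ++ [cur]) lines0
      = pvAnsA ((bs.filter (fun b => !b.isEmpty)).getLastD []) cur lines0 := by
  unfold pvAnsB pvAnsA
  rw [pvFilter_append_single]
  by_cases hc : !cur.isEmpty
  · simp [hc]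
  · have hc' : cur = [] := by simpa using hc
    subst hc'
    rcases h : (bs.filter (fun b => !b.isEmpty)).getLast? with _ | b
    · simp [List.getLastD_eq_getLast?, h]
    · have hb := pvGetLast?_filter_ne bs b h
      simp [List.getLastD_eq_getLast?, h, hb]

lemma pvLoopA_true_eq (rest : List String) : ∀ (bs : List (List String)) (cur lines0 : List String),
    (let st := pvLoopA rest ((bs.filter (fun b => !b.isEmpty)).getLastD []) cur true
     pvAnsA st.1 st.2.1 lines0) = pvAnsB (pvLoopB rest (bs ++ [cur])) lines0 := by
  induction rest with
  | nil => intro bs cur lines0; simp [pvLoopA, pvLoopB, pvAnsB_concat]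
  | cons raw rest ih =>
    intro bs cur lines0
    simp only [pvLoopA, pvLoopB]
    by_cases hm : PySem.Str.strip raw = "Refreshing:"
    · simp only [hm, if_true]
      have h2 : ((bs ++ [cur]).filter (fun b => !b.isEmpty)).getLastD []
          = if !cur.isEmpty then cur else (bs.filter (fun b => !b.isEmpty)).getLastD [] := by
        rw [pvFilter_append_single]
        by_cases hc : !cur.isEmpty <;> simp [hc]
      have := ih (bs ++ [cur]) [] lines0
      simp only [h2] at this ⊢
      simpa [List.append_assoc] using this
    · have hne : ((bs ++ [cur]).isEmpty) = false := by simp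
      rw [if_neg hm, if_neg hm, hne]
      have hdrop : (bs ++ [cur]).dropLast = bs := List.dropLast_concat ..
      have hlast : (bs ++ [cur]).getLastD [] = cur := List.getLastD_concat ..
      rw [hdrop, hlast]
      simpa using ih bs (cur ++ [raw]) lines0

theorem pv_main (lines lines0 : List String) :
    (let st := pvLoopA lines [] [] false
     pvAnsA st.1 st.2.1 lines0) = pvAnsB (pvLoopB lines []) lines0 := by
  induction lines with
  | nil => simp [pvLoopA, pvLoopB, pvAnsA, pvAnsB]
  | cons raw rest ih =>
    simp only [pvLoopA, pvLoopB]
    by_cases hm : PySem.Str.strip raw = "Refreshing:"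
    · simp only [hm, if_true]
      have := pvLoopA_true_eq rest [] [] lines0
      simpa using this
    · simpa [hm, pvLoopA, pvLoopB] using ih

-- ===== VERDICT (by name: the statement is the Claim_ definition above) =====
theorem latest_nethogs_block_py_spec : Claim_equal_latest_nethogs_block_py := by
  intro output _
  unfold Spec_latest_nethogs_block_py latest_nethogs_block_py latest_nethogs_block_py_alt
  have h := pv_main (PySem.Str.splitlines output) (PySem.Str.splitlines output)
  simp only [pvAnsA, pvAnsB] at h
  simpa using h
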